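-- pv_equiv track=rewrite | github.com/Kim-menu/coding-test | solutions/problem073.py | get_rotate_list
-- ===== SOURCE A (Python) =====
-- def get_rotate_list(segment):
--     rotate_list = [segment]
--     for i in range(3):
--         rotate = [[0] * len(segment) for _ in range(len(segment))]
--         for row in range(len(segment)):
--             for col in range(len(segment)):
--                 rotate[col][len(segment)-1-row] = rotate_list[i][row][col]
--         rotate_list.append(rotate)
--     return rotate_list
-- ===== SOURCE B (Python) =====
-- def get_rotate_list(segment):
--     n = len(segment)
--     r90 = [[segment[n - 1 - j][i] for j in range(n)] for i in range(n)]
--     r180 = [[segment[n - 1 - i][n - 1 - j] for j in range(n)] for i in range(n)]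
--     r270 = [[segment[j][n - 1 - i] for j in range(n)] for i in range(n)]
--     return [segment, r90, r180, r270]
-- ===== Notes on version B (the rewrite author's own statement) =====
-- stated objective: alternative
-- what changed: A builds the four orientations iteratively, three times scatter-writing a preallocated n×n grid from the previous rotation; B never iterates rotation: it computes each of the 90/180/270-degree orientations independently from the original matrix with its own closed-form coordinate map and returns the four-element list directly.
import Mathlib
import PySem

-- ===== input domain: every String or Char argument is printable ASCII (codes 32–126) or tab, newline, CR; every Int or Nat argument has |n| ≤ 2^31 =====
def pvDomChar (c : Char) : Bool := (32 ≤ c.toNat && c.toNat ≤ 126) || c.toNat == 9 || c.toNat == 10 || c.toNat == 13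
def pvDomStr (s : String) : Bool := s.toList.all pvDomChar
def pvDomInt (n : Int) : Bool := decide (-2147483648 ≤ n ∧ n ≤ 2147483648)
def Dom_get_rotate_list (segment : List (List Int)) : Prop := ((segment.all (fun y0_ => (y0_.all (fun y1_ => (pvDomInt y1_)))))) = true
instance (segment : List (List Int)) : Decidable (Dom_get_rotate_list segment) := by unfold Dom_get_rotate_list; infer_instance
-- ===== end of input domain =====

-- B computes the 90/180/270-degree orientations directly from the original matrix by closed-form coordinate maps instead of A's three successive scatter-write rotation passes (alternative decomposition; same cost).


-- ===== PORT A =====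
-- read cell m[i][j] (in range on every input Pre_ admits; Python would raise out of range)
def pvCell (g : List (List Int)) (i j : Nat) : Int := (g.getD i []).getD j 0

-- rotate[r][c] = v
def pvSetCell (g : List (List Int)) (r c : Nat) (v : Int) : List (List Int) :=
  g.set r ((g.getD r []).set c v)

-- the body of A's outer 'for i in range(3)' loop: build the n×n zero grid and scatter-write it
def pvRotA (n : Nat) (m : List (List Int)) : List (List Int) :=
  (List.range n).foldl (fun g row =>
    (List.range n).foldl (fun g col =>
      pvSetCell g col (n - 1 - row) (pvCell m row col)) g)
    (List.replicate n (List.replicate n 0))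

def get_rotate_list (segment : List (List Int)) : List (List (List Int)) :=
  (List.range 3).foldl (fun rl i => rl ++ [pvRotA segment.length (rl.getD i [])]) [segment]

-- ===== PORT B =====
-- each orientation gathered directly from segment (indices in range on Pre_; Python raises otherwise)
def get_rotate_list_alt (segment : List (List Int)) : List (List (List Int)) :=
  let n := segment.length
  let r90 := (List.range n).map (fun i => (List.range n).map (fun j => pvCell segment (n - 1 - j) i))
  let r180 := (List.range n).map (fun i => (List.range n).map (fun j => pvCell segment (n - 1 - i) (n - 1 - j)))
  let r270 := (List.range n).map (fun i => (List.range n).map (fun j => pvCell segment j (n - 1 - i)))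
  [segment, r90, r180, r270]

-- ===== PRECONDITION & SPEC =====
-- Pre_ excludes exactly the inputs on which both Pythons raise IndexError: matrices with a row
-- shorter than the number of rows (both index every row at columns 0..len(segment)-1).
def Pre_get_rotate_list (segment : List (List Int)) : Prop :=
  ∀ r ∈ segment, segment.length ≤ r.length
instance (segment : List (List Int)) : Decidable (Pre_get_rotate_list segment) := by
  unfold Pre_get_rotate_list; infer_instance

def pvWitness_get_rotate_list : List (List Int) := [[1, 2], [3, 4]]

def Spec_get_rotate_list (segment : List (List Int)) (out : List (List (List Int))) : Prop := out = get_rotate_list_alt segment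
instance (segment : List (List Int)) (out : List (List (List Int))) : Decidable (Spec_get_rotate_list segment out) := by unfold Spec_get_rotate_list; infer_instance

-- ===== CLAIM (what is proved, stated in full; the proofs are below) =====
def Claim_equal_get_rotate_list : Prop := ∀ (segment : List (List Int)), Dom_get_rotate_list segment → Pre_get_rotate_list segment → Spec_get_rotate_list segment (get_rotate_list segment)

-- ===== LEMMAS AND PROOFS =====

-- the 90° clockwise rotation written as a closed map form: entry (i, j) is m[n-1-j][i]
def rotCanon (n : Nat) (m : List (List Int)) : List (List Int) :=
  (List.range n).map (fun i => (List.range n).map (fun j => pvCell m (n - 1 - j) i))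

-- A's grid after the first r outer iterations and, within iteration r, the first c inner iterations
def innerGrid (n r c : Nat) (m : List (List Int)) : List (List Int) :=
  (List.range n).map (fun i => (List.range n).map (fun j =>
    if n - r ≤ j ∨ (j = n - 1 - r ∧ i < c) then pvCell m (n - 1 - j) i else 0))

lemma set_innerGrid (n r c : Nat) (m : List (List Int)) (hr : r < n) (_hc : c < n) :
    pvSetCell (innerGrid n r c m) c (n - 1 - r) (pvCell m r c) = innerGrid n r (c + 1) m := by
  unfold pvSetCell
  apply List.ext_getElem
  · simp [innerGrid]
  · intro i h1 h2
    simp only [innerGrid, List.length_set, List.length_map, List.length_range] at h1 h2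
    rw [List.getElem_set]
    by_cases hic : c = i
    · subst hic
      rw [if_pos rfl]
      rw [List.getD_eq_getElem _ [] (by simp [innerGrid]; omega)]
      simp only [innerGrid, List.getElem_map, List.getElem_range]
      apply List.ext_getElem
      · simp
      · intro j h3 h4
        simp only [List.length_set, List.length_map, List.length_range] at h3 h4
        rw [List.getElem_set]
        simp only [List.getElem_map, List.getElem_range]
        by_cases hj : n - 1 - r = j
        · rw [if_pos hj]
          rw [if_pos (Or.inr ⟨hj.symm, by omega⟩)]
          have : n - 1 - j = r := by omega
          rw [this]
        · rw [if_neg hj]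
          split_ifs with hA hB hB
          · rfl
          · exfalso; omega
          · exfalso; omega
          · rfl
    · rw [if_neg hic]
      simp only [innerGrid, List.getElem_map, List.getElem_range]
      apply List.map_congr_left
      intro j hj
      simp only [List.mem_range] at hj
      split_ifs with hA hB hB
      · rfl
      · exfalso; omega
      · exfalso; omega
      · rfl

lemma inner_fold (n r : Nat) (m : List (List Int)) (hr : r < n) : ∀ c, c ≤ n →
    (List.range c).foldl (fun g col => pvSetCell g col (n - 1 - r) (pvCell m r col))
      (innerGrid n r 0 m) = innerGrid n r c m := by
  intro c
  induction c with
  | zero => intro _; rfl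
  | succ k ih =>
    intro hk
    rw [List.range_succ, List.foldl_append, ih (by omega)]
    simpa using set_innerGrid n r k m hr (by omega)

lemma innerGrid_zero (n : Nat) (m : List (List Int)) :
    innerGrid n 0 0 m = List.replicate n (List.replicate n (0 : Int)) := by
  unfold innerGrid
  apply List.ext_getElem
  · simp
  · intro i h1 h2
    simp only [List.getElem_map, List.getElem_range, List.getElem_replicate]
    apply List.ext_getElem
    · simp
    · intro j h3 h4
      simp only [List.length_map, List.length_range] at h3
      simp only [List.getElem_map, List.getElem_range, List.getElem_replicate]
      rw [if_neg (by omega)]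

lemma innerGrid_full (n r : Nat) (m : List (List Int)) (hr : r < n) :
    innerGrid n r n m = innerGrid n (r + 1) 0 m := by
  unfold innerGrid
  apply List.map_congr_left
  intro i hi
  apply List.map_congr_left
  intro j hj
  simp only [List.mem_range] at hi hj
  split_ifs with hA hB hB
  · rfl
  · exfalso; omega
  · exfalso; omega
  · rfl

lemma outer_fold (n : Nat) (m : List (List Int)) : ∀ r, r ≤ n →
    (List.range r).foldl (fun g row =>
        (List.range n).foldl (fun g col => pvSetCell g col (n - 1 - row) (pvCell m row col)) g)
      (List.replicate n (List.replicate n 0)) = innerGrid n r 0 m := by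
  intro r
  induction r with
  | zero => intro _; rw [List.range_zero, List.foldl_nil, innerGrid_zero]
  | succ k ih =>
    intro hk
    rw [List.range_succ, List.foldl_append, ih (by omega), List.foldl_cons, List.foldl_nil,
      inner_fold n k m (by omega) n (le_refl n), innerGrid_full n k m (by omega)]

lemma rotA_eq (n : Nat) (m : List (List Int)) : pvRotA n m = rotCanon n m := by
  have h := outer_fold n m n (le_refl n)
  unfold pvRotA
  rw [h]
  unfold innerGrid rotCanon
  apply List.map_congr_left
  intro i hi
  apply List.map_congr_left
  intro j hj
  simp only [List.mem_range] at hj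
  rw [if_pos (Or.inl (by omega))]

-- reading a cell of a grid built as a double map over ranges, both coordinates in range
lemma cell_grid (n a b : Nat) (f : Nat → Nat → Int) (ha : a < n) (hb : b < n) :
    pvCell ((List.range n).map (fun i => (List.range n).map (fun j => f i j))) a b = f a b := by
  unfold pvCell
  rw [List.getD_eq_getElem _ [] (by simpa using ha)]
  simp only [List.getElem_map, List.getElem_range]
  rw [List.getD_eq_getElem _ 0 (by simpa using hb)]
  simp

lemma rotCanon_sq (n : Nat) (m : List (List Int)) :
    rotCanon n (rotCanon n m) =
      (List.range n).map (fun i => (List.range n).map (fun j => pvCell m (n - 1 - i) (n - 1 - j))) := by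
  unfold rotCanon
  apply List.map_congr_left
  intro i hi
  apply List.map_congr_left
  intro j hj
  simp only [List.mem_range] at hi hj
  rw [cell_grid n (n - 1 - j) i (fun a b => pvCell m (n - 1 - b) a) (by omega) hi]

lemma rotCanon_r180 (n : Nat) (m : List (List Int)) :
    rotCanon n ((List.range n).map (fun i => (List.range n).map (fun j => pvCell m (n - 1 - i) (n - 1 - j)))) =
      (List.range n).map (fun i => (List.range n).map (fun j => pvCell m j (n - 1 - i))) := by
  unfold rotCanon
  apply List.map_congr_left
  intro i hi
  apply List.map_congr_left
  intro j hj
  simp only [List.mem_range] at hi hj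
  rw [cell_grid n (n - 1 - j) i (fun a b => pvCell m (n - 1 - a) (n - 1 - b)) (by omega) hi]
  have h : n - 1 - (n - 1 - j) = j := by omega
  rw [h]

-- ===== VERDICT (by name: the statement is the Claim_ definition above) =====
theorem get_rotate_list_spec : Claim_equal_get_rotate_list := by
  intro segment _ _
  unfold Spec_get_rotate_list
  have e1 : get_rotate_list segment =
      [segment, pvRotA segment.length segment,
        pvRotA segment.length (pvRotA segment.length segment),
        pvRotA segment.length (pvRotA segment.length (pvRotA segment.length segment))] := rfl
  rw [e1, rotA_eq, rotA_eq, rotA_eq, rotCanon_sq, rotCanon_r180]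
  rfl
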